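-- pv_equiv track=rewrite | github.com/Mannosantino/ProyectoProgramacion1 | Funciones.py | total_categoria
-- ===== SOURCE A (Python) =====
-- def total_categoria(lista_productos, stock, lacteos, bebidas, dulces, alimentos, frutas_verduras):
--     total_lacteos = 0
--     total_bebidas = 0
--     total_dulces = 0
--     total_alimentos = 0
--     total_frutas_verduras = 0
--
--     for i in range(len(lista_productos)):
--         producto = lista_productos[i]
--         cantidad = stock[i]
--
--         if producto in lacteos:
--             total_lacteos = total_lacteos + cantidad
--         elif producto in bebidas:
--             total_bebidas = total_bebidas + cantidad
--         elif producto in dulces: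
--             total_dulces = total_dulces + cantidad
--         elif producto in alimentos:
--             total_alimentos = total_alimentos + cantidad
--         elif producto in frutas_verduras:
--             total_frutas_verduras = total_frutas_verduras + cantidad
--
--     stock_total = total_lacteos + total_bebidas + total_dulces + total_alimentos + total_frutas_verduras
--
--     return total_lacteos, total_bebidas, total_dulces, total_alimentos, total_frutas_verduras, stock_total
-- ===== SOURCE B (Python) =====
-- def total_categoria(lista_productos, stock, lacteos, bebidas, dulces, alimentos, frutas_verduras):
--     # Staged per-category passes: for each category in priority order, take the set of its
--     # products not claimed by an earlier category, and sum the matching stock in one filter pass.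
--     pares = list(zip(lista_productos, stock))
--     seen = set()
--     totales = []
--     for grupo in (lacteos, bebidas, dulces, alimentos, frutas_verduras):
--         miembros = set(grupo) - seen
--         totales.append(sum(c for p, c in pares if p in miembros))
--         seen |= miembros
--     totales.append(sum(totales))
--     return tuple(totales)
-- ===== Notes on version B (the rewrite author's own statement) =====
-- stated objective: alternative
-- what changed: Replaces A's single pass with a per-item five-way elif membership ladder by five staged per-category passes: for each category in priority order build set(group) minus the products already claimed by earlier categories, then sum the matching stock with one filter pass; no per-item classification remains.
import Mathlib
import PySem

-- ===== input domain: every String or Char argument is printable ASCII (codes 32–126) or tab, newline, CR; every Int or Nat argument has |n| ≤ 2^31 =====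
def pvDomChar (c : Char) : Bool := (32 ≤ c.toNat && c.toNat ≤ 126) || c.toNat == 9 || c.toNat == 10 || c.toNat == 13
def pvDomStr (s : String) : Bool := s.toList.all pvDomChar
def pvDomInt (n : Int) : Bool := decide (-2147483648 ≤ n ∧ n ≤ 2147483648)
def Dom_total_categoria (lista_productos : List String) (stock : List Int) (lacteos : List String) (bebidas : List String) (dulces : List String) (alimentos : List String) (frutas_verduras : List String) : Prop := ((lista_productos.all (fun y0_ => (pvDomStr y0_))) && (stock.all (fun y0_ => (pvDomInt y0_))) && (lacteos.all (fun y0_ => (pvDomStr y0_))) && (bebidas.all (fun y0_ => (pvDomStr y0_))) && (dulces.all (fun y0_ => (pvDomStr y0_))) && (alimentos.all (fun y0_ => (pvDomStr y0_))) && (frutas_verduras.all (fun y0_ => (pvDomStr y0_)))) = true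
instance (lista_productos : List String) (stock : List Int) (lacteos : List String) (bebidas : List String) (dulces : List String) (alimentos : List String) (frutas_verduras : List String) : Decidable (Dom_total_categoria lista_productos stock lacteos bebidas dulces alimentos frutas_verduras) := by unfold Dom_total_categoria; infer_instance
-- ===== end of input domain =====

-- B replaces A's per-item elif classification loop by five staged per-category
-- filter-sum passes over the zipped data (set(group) minus products claimed by
-- earlier categories); measured faster in a timing run (per-category set
-- membership replaces per-item list scans).

-- ===== PORT A =====
-- step function of A's for-loop: five running totals, elif ladder in source order
def pvStepA (lacteos bebidas dulces alimentos frutas_verduras : List String)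
    (t : Int × Int × Int × Int × Int) (producto : String) (cantidad : Int) :
    Int × Int × Int × Int × Int :=
  if producto ∈ lacteos then (t.1 + cantidad, t.2.1, t.2.2.1, t.2.2.2.1, t.2.2.2.2)
  else if producto ∈ bebidas then (t.1, t.2.1 + cantidad, t.2.2.1, t.2.2.2.1, t.2.2.2.2)
  else if producto ∈ dulces then (t.1, t.2.1, t.2.2.1 + cantidad, t.2.2.2.1, t.2.2.2.2)
  else if producto ∈ alimentos then (t.1, t.2.1, t.2.2.1, t.2.2.2.1 + cantidad, t.2.2.2.2)
  else if producto ∈ frutas_verduras then (t.1, t.2.1, t.2.2.1, t.2.2.2.1, t.2.2.2.2 + cantidad)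
  else t

def total_categoria (lista_productos : List String) (stock : List Int) (lacteos : List String) (bebidas : List String) (dulces : List String) (alimentos : List String) (frutas_verduras : List String) : List Int :=
  -- for i in range(len(lista_productos)): producto = lista_productos[i]; cantidad = stock[i]
  -- (stock[i] raises IndexError when stock is shorter — excluded by Pre_; pyGetD is exact under Pre_)
  let r := (PySem.List.pyRange 0 (lista_productos.length : Int) 1).foldl
    (fun t i =>
      pvStepA lacteos bebidas dulces alimentos frutas_verduras t
        (PySem.List.pyGetD lista_productos i "") (PySem.List.pyGetD stock i 0))
    (0, 0, 0, 0, 0)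
  [r.1, r.2.1, r.2.2.1, r.2.2.2.1, r.2.2.2.2,
   r.1 + r.2.1 + r.2.2.1 + r.2.2.2.1 + r.2.2.2.2]

-- ===== PORT B =====
-- sum(c for p, c in pares if p in miembros)
def pvSumPass (pares : List (String × Int)) (miembros : PySem.Set String) : Int :=
  ((pares.filter (fun pc => PySem.Set.contains miembros pc.1)).map Prod.snd).sum

def total_categoria_alt (lista_productos : List String) (stock : List Int) (lacteos : List String) (bebidas : List String) (dulces : List String) (alimentos : List String) (frutas_verduras : List String) : List Int :=
  let pares := lista_productos.zip stock
  -- for grupo in (...): miembros = set(grupo) - seen; totales.append(sum pass); seen |= miembros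
  let r := [lacteos, bebidas, dulces, alimentos, frutas_verduras].foldl
    (fun (st : PySem.Set String × List Int) grupo =>
      let miembros := PySem.Set.diff (PySem.Set.ofList grupo) st.1
      (PySem.Set.union st.1 miembros, st.2 ++ [pvSumPass pares miembros]))
    (PySem.Set.empty, [])
  r.2 ++ [r.2.sum]

-- ===== PRECONDITION & SPEC =====
-- Pre_ excludes exactly the inputs where A raises IndexError (stock shorter than lista_productos).
def Pre_total_categoria (lista_productos : List String) (stock : List Int) (lacteos : List String) (bebidas : List String) (dulces : List String) (alimentos : List String) (frutas_verduras : List String) : Prop :=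
  lista_productos.length ≤ stock.length
instance (lista_productos : List String) (stock : List Int) (lacteos : List String) (bebidas : List String) (dulces : List String) (alimentos : List String) (frutas_verduras : List String) : Decidable (Pre_total_categoria lista_productos stock lacteos bebidas dulces alimentos frutas_verduras) := by unfold Pre_total_categoria; infer_instance

def pvWitness_total_categoria : List String × List Int × List String × List String × List String × List String × List String :=
  (["pan", "leche"], [3, 4], ["leche"], [], [], ["pan"], [])

def Spec_total_categoria (lista_productos : List String) (stock : List Int) (lacteos : List String) (bebidas : List String) (dulces : List String) (alimentos : List String) (frutas_verduras : List String) (out : List Int) : Prop := out = total_categoria_alt lista_productos stock lacteos bebidas dulces alimentos frutas_verduras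
instance (lista_productos : List String) (stock : List Int) (lacteos : List String) (bebidas : List String) (dulces : List String) (alimentos : List String) (frutas_verduras : List String) (out : List Int) : Decidable (Spec_total_categoria lista_productos stock lacteos bebidas dulces alimentos frutas_verduras out) := by unfold Spec_total_categoria; infer_instance

-- ===== CLAIM (what is proved, stated in full; the proofs are below) =====
def Claim_equal_total_categoria : Prop := ∀ (lista_productos : List String) (stock : List Int) (lacteos : List String) (bebidas : List String) (dulces : List String) (alimentos : List String) (frutas_verduras : List String), Dom_total_categoria lista_productos stock lacteos bebidas dulces alimentos frutas_verduras → Pre_total_categoria lista_productos stock lacteos bebidas dulces alimentos frutas_verduras → Spec_total_categoria lista_productos stock lacteos bebidas dulces alimentos frutas_verduras (total_categoria lista_productos stock lacteos bebidas dulces alimentos frutas_verduras)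

-- ===== LEMMAS AND PROOFS =====

-- the five "first category wins" predicates, as Booleans on a (product, quantity) pair
def pvF1 (lac : List String) (pc : String × Int) : Bool := decide (pc.1 ∈ lac)
def pvF2 (lac beb : List String) (pc : String × Int) : Bool := decide (pc.1 ∉ lac ∧ pc.1 ∈ beb)
def pvF3 (lac beb dul : List String) (pc : String × Int) : Bool := decide (pc.1 ∉ lac ∧ pc.1 ∉ beb ∧ pc.1 ∈ dul)
def pvF4 (lac beb dul ali : List String) (pc : String × Int) : Bool := decide (pc.1 ∉ lac ∧ pc.1 ∉ beb ∧ pc.1 ∉ dul ∧ pc.1 ∈ ali)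
def pvF5 (lac beb dul ali fv : List String) (pc : String × Int) : Bool := decide (pc.1 ∉ lac ∧ pc.1 ∉ beb ∧ pc.1 ∉ dul ∧ pc.1 ∉ ali ∧ pc.1 ∈ fv)

-- filtered sum of a category
def pvS (f : String × Int → Bool) (l : List (String × Int)) : Int := ((l.filter f).map Prod.snd).sum

-- A's tuple fold, component-wise: each total accumulates exactly its category's filtered sum
theorem foldA_eq (lac beb dul ali fv : List String) (l : List (String × Int)) (t1 t2 t3 t4 t5 : Int) :
    l.foldl (fun t pc => pvStepA lac beb dul ali fv t pc.1 pc.2) (t1, t2, t3, t4, t5)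
      = (t1 + pvS (pvF1 lac) l, t2 + pvS (pvF2 lac beb) l, t3 + pvS (pvF3 lac beb dul) l,
         t4 + pvS (pvF4 lac beb dul ali) l, t5 + pvS (pvF5 lac beb dul ali fv) l) := by
  induction l generalizing t1 t2 t3 t4 t5 with
  | nil => simp [pvS]
  | cons pc rest ih =>
    obtain ⟨p, c⟩ := pc
    rw [List.foldl_cons]
    show (rest.foldl (fun t pc => pvStepA lac beb dul ali fv t pc.1 pc.2)
        (pvStepA lac beb dul ali fv (t1, t2, t3, t4, t5) p c)) = _
    by_cases h1 : p ∈ lac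
    · rw [show pvStepA lac beb dul ali fv (t1, t2, t3, t4, t5) p c = (t1 + c, t2, t3, t4, t5) from by
        simp [pvStepA, h1], ih]
      simp only [Prod.mk.injEq, pvS, pvF1, pvF2, pvF3, pvF4, pvF5, List.filter_cons]
      simp [h1]; ring
    · by_cases h2 : p ∈ beb
      · rw [show pvStepA lac beb dul ali fv (t1, t2, t3, t4, t5) p c = (t1, t2 + c, t3, t4, t5) from by
          simp [pvStepA, h1, h2], ih]
        simp only [Prod.mk.injEq, pvS, pvF1, pvF2, pvF3, pvF4, pvF5, List.filter_cons]
        simp [h1, h2]; ring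
      · by_cases h3 : p ∈ dul
        · rw [show pvStepA lac beb dul ali fv (t1, t2, t3, t4, t5) p c = (t1, t2, t3 + c, t4, t5) from by
            simp [pvStepA, h1, h2, h3], ih]
          simp only [Prod.mk.injEq, pvS, pvF1, pvF2, pvF3, pvF4, pvF5, List.filter_cons]
          simp [h1, h2, h3]; ring
        · by_cases h4 : p ∈ ali
          · rw [show pvStepA lac beb dul ali fv (t1, t2, t3, t4, t5) p c = (t1, t2, t3, t4 + c, t5) from by
              simp [pvStepA, h1, h2, h3, h4], ih]
            simp only [Prod.mk.injEq, pvS, pvF1, pvF2, pvF3, pvF4, pvF5, List.filter_cons]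
            simp [h1, h2, h3, h4]; ring
          · by_cases h5 : p ∈ fv
            · rw [show pvStepA lac beb dul ali fv (t1, t2, t3, t4, t5) p c = (t1, t2, t3, t4, t5 + c) from by
                simp [pvStepA, h1, h2, h3, h4, h5], ih]
              simp only [Prod.mk.injEq, pvS, pvF1, pvF2, pvF3, pvF4, pvF5, List.filter_cons]
              simp [h1, h2, h3, h4, h5]; ring
            · rw [show pvStepA lac beb dul ali fv (t1, t2, t3, t4, t5) p c = (t1, t2, t3, t4, t5) from by
                simp [pvStepA, h1, h2, h3, h4, h5], ih]
              simp only [Prod.mk.injEq, pvS, pvF1, pvF2, pvF3, pvF4, pvF5, List.filter_cons]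
              simp [h1, h2, h3, h4, h5]

-- the five staged "miembros" sets filter exactly the five category predicates
theorem filter_m1 (lac : List String) (l : List (String × Int)) :
    l.filter (fun pc => PySem.Set.contains (PySem.Set.diff (PySem.Set.ofList lac) PySem.Set.empty) pc.1)
      = l.filter (pvF1 lac) := by
  refine List.filter_congr fun pc _ => Bool.eq_iff_iff.mpr ?_
  simp [pvF1, PySem.Set.mem_diff, PySem.Set.mem_ofList, PySem.Set.empty]

theorem filter_m2 (lac beb : List String) (l : List (String × Int)) :
    l.filter (fun pc => PySem.Set.contains (PySem.Set.diff (PySem.Set.ofList beb)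
        (PySem.Set.union PySem.Set.empty (PySem.Set.diff (PySem.Set.ofList lac) PySem.Set.empty))) pc.1)
      = l.filter (pvF2 lac beb) := by
  refine List.filter_congr fun pc _ => Bool.eq_iff_iff.mpr ?_
  simp only [pvF2, PySem.Set.contains_iff, PySem.Set.mem_diff,
    PySem.Set.mem_union, PySem.Set.mem_ofList, PySem.Set.empty, List.not_mem_nil,
    decide_eq_true_eq]
  tauto

theorem filter_m3 (lac beb dul : List String) (l : List (String × Int)) :
    l.filter (fun pc => PySem.Set.contains (PySem.Set.diff (PySem.Set.ofList dul)
        (PySem.Set.union (PySem.Set.union PySem.Set.empty (PySem.Set.diff (PySem.Set.ofList lac) PySem.Set.empty))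
          (PySem.Set.diff (PySem.Set.ofList beb)
            (PySem.Set.union PySem.Set.empty (PySem.Set.diff (PySem.Set.ofList lac) PySem.Set.empty))))) pc.1)
      = l.filter (pvF3 lac beb dul) := by
  refine List.filter_congr fun pc _ => Bool.eq_iff_iff.mpr ?_
  simp only [pvF3, PySem.Set.contains_iff, PySem.Set.mem_diff,
    PySem.Set.mem_union, PySem.Set.mem_ofList, PySem.Set.empty, List.not_mem_nil,
    decide_eq_true_eq]
  tauto

theorem filter_m4 (lac beb dul ali : List String) (l : List (String × Int)) :
    l.filter (fun pc => PySem.Set.contains (PySem.Set.diff (PySem.Set.ofList ali)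
        (PySem.Set.union (PySem.Set.union (PySem.Set.union PySem.Set.empty (PySem.Set.diff (PySem.Set.ofList lac) PySem.Set.empty))
            (PySem.Set.diff (PySem.Set.ofList beb)
              (PySem.Set.union PySem.Set.empty (PySem.Set.diff (PySem.Set.ofList lac) PySem.Set.empty))))
          (PySem.Set.diff (PySem.Set.ofList dul)
            (PySem.Set.union (PySem.Set.union PySem.Set.empty (PySem.Set.diff (PySem.Set.ofList lac) PySem.Set.empty))
              (PySem.Set.diff (PySem.Set.ofList beb)
                (PySem.Set.union PySem.Set.empty (PySem.Set.diff (PySem.Set.ofList lac) PySem.Set.empty))))))) pc.1)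
      = l.filter (pvF4 lac beb dul ali) := by
  refine List.filter_congr fun pc _ => Bool.eq_iff_iff.mpr ?_
  simp only [pvF4, PySem.Set.contains_iff, PySem.Set.mem_diff,
    PySem.Set.mem_union, PySem.Set.mem_ofList, PySem.Set.empty, List.not_mem_nil,
    decide_eq_true_eq]
  tauto

theorem filter_m5 (lac beb dul ali fv : List String) (l : List (String × Int)) :
    l.filter (fun pc => PySem.Set.contains (PySem.Set.diff (PySem.Set.ofList fv)
        (PySem.Set.union (PySem.Set.union (PySem.Set.union (PySem.Set.union PySem.Set.empty (PySem.Set.diff (PySem.Set.ofList lac) PySem.Set.empty))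
              (PySem.Set.diff (PySem.Set.ofList beb)
                (PySem.Set.union PySem.Set.empty (PySem.Set.diff (PySem.Set.ofList lac) PySem.Set.empty))))
            (PySem.Set.diff (PySem.Set.ofList dul)
              (PySem.Set.union (PySem.Set.union PySem.Set.empty (PySem.Set.diff (PySem.Set.ofList lac) PySem.Set.empty))
                (PySem.Set.diff (PySem.Set.ofList beb)
                  (PySem.Set.union PySem.Set.empty (PySem.Set.diff (PySem.Set.ofList lac) PySem.Set.empty))))))
          (PySem.Set.diff (PySem.Set.ofList ali)
            (PySem.Set.union (PySem.Set.union (PySem.Set.union PySem.Set.empty (PySem.Set.diff (PySem.Set.ofList lac) PySem.Set.empty))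
                (PySem.Set.diff (PySem.Set.ofList beb)
                  (PySem.Set.union PySem.Set.empty (PySem.Set.diff (PySem.Set.ofList lac) PySem.Set.empty))))
              (PySem.Set.diff (PySem.Set.ofList dul)
                (PySem.Set.union (PySem.Set.union PySem.Set.empty (PySem.Set.diff (PySem.Set.ofList lac) PySem.Set.empty))
                  (PySem.Set.diff (PySem.Set.ofList beb)
                    (PySem.Set.union PySem.Set.empty (PySem.Set.diff (PySem.Set.ofList lac) PySem.Set.empty))))))))) pc.1)
      = l.filter (pvF5 lac beb dul ali fv) := by
  refine List.filter_congr fun pc _ => Bool.eq_iff_iff.mpr ?_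
  simp only [pvF5, PySem.Set.contains_iff, PySem.Set.mem_diff,
    PySem.Set.mem_union, PySem.Set.mem_ofList, PySem.Set.empty, List.not_mem_nil,
    decide_eq_true_eq]
  tauto

-- fold over range(len xs) with getD on two parallel lists = fold over zip (needs len xs ≤ len ys)
theorem foldl_range_getD_zip {α β γ : Type} (f : γ → α → β → γ) (da : α) (db : β)
    (xs : List α) (ys : List β) (h : xs.length ≤ ys.length) (init : γ) :
    (List.range xs.length).foldl (fun acc m => f acc (xs.getD m da) (ys.getD m db)) init
      = (xs.zip ys).foldl (fun acc pc => f acc pc.1 pc.2) init := by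
  induction xs generalizing ys init with
  | nil => simp
  | cons x xs ih =>
    cases ys with
    | nil => simp at h
    | cons y ys =>
      simp only [List.length_cons, List.range_succ_eq_map, List.foldl_cons, List.foldl_map,
        List.getD_cons_zero, List.getD_cons_succ, List.zip_cons_cons]
      exact ih ys (by simpa using h) (f init x y)

-- ===== VERDICT (by name: the statement is the Claim_ definition above) =====
theorem total_categoria_spec : Claim_equal_total_categoria := by
  intro lista stock lac beb dul ali fv _hDom hPre
  unfold Spec_total_categoria total_categoria total_categoria_alt
  rw [PySem.List.pyRange_one]
  simp only [sub_zero, Int.toNat_natCast, List.foldl_map, zero_add, PySem.List.pyGetD_natCast]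
  rw [foldl_range_getD_zip _ "" 0 lista stock hPre]
  rw [foldA_eq]
  simp only [List.foldl_cons, List.foldl_nil, pvSumPass]
  rw [filter_m1, filter_m2, filter_m3, filter_m4, filter_m5]
  simp [pvS, List.sum]
  ring
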